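-- pv_equiv track=rewrite | github.com/mgfriedel/public-scripts | cvp/getMacArp.py | devToAll
-- ===== SOURCE A (Python) =====
-- def devToAll(perDevData):
--     ''' Returns dict of data by key across all devices '''
--     allData = {}
--     for devId, devData in perDevData.items():
--          for ent, entData in devData.items():
--              if ent not in allData:
--                  allData[ent] = []
--              allData[ent].extend(entData)
--     return allData
-- ===== SOURCE B (Python) =====
-- def devToAll(perDevData):
--     ''' Returns dict of data by key across all devices '''
--     keys = dict.fromkeys(ent for devData in perDevData.values() for ent in devData)
--     return {ent: [x for devData in perDevData.values()
--                     for k, entData in devData.items() if k == ent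
--                     for x in entData]
--             for ent in keys}
-- ===== Notes on version B (the rewrite author's own statement) =====
-- stated objective: alternative
-- what changed: A scatters entries into a growing dict (guarded empty-init then extend) in one nested pass; B first builds the ordered union of entry keys with dict.fromkeys, then for each key gathers its merged list by scanning the devices, a transposed gather instead of A's scatter.
import Mathlib
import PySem

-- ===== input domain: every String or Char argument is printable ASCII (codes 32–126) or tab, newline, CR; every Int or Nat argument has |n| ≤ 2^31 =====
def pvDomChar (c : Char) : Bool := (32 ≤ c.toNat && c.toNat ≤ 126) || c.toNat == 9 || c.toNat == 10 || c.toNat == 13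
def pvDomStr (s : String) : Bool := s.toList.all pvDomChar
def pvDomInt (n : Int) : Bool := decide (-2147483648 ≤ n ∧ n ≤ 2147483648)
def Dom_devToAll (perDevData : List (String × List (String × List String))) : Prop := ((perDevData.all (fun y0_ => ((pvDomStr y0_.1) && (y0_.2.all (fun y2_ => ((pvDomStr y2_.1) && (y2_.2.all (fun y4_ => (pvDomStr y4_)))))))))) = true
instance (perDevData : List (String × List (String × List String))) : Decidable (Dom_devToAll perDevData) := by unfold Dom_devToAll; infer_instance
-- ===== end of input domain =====

-- B replaces A's scatter into a growing dict by a gather: build the first-occurrence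
-- key list once, then emit each key's merged list directly (objective: alternative).

-- ===== PORT A =====
-- A: allData = {}; for devData in perDevData.values(): for ent, entData in devData.items():
--      if ent not in allData: allData[ent] = []
--      allData[ent].extend(entData)            -- = allData.modify ent [] (· ++ entData), key known present
def devToAll (perDevData : List (String × List (String × List String))) : List (String × List String) :=
  (perDevData.foldl
    (fun allData dev =>
      dev.2.foldl
        (fun allData e =>
          let allData1 := if allData.contains e.1 then allData else allData.insert e.1 ([] : List String)
          allData1.modify e.1 [] (· ++ e.2))
        allData)
    (PySem.Dict.empty : PySem.Dict String (List String))).items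

-- ===== PORT B =====
-- B: keys = dict.fromkeys(ent for devData in values for ent in devData);
--    {ent: [x for devData in values for k, entData in devData.items() if k == ent for x in entData] for ent in keys}
def devToAll_alt (perDevData : List (String × List (String × List String))) : List (String × List String) :=
  let keys := PySem.List.dedup (perDevData.flatMap (fun dev => dev.2.map (·.1)))
  keys.map (fun ent =>
    (ent, perDevData.flatMap (fun dev => dev.2.flatMap (fun e => if e.1 == ent then e.2 else []))))

-- ===== PRECONDITION & SPEC =====
def Spec_devToAll (perDevData : List (String × List (String × List String))) (out : List (String × List String)) : Prop := out = devToAll_alt perDevData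
instance (perDevData : List (String × List (String × List String))) (out : List (String × List String)) : Decidable (Spec_devToAll perDevData out) := by unfold Spec_devToAll; infer_instance

-- ===== CLAIM (what is proved, stated in full; the proofs are below) =====
def Claim_equal_devToAll : Prop := ∀ (perDevData : List (String × List (String × List String))), Dom_devToAll perDevData → Spec_devToAll perDevData (devToAll perDevData)

-- ===== LEMMAS AND PROOFS =====

-- A's per-entry body (guarded insert of [] then extend) is one dict modify.
theorem pv_step_eq (d : PySem.Dict String (List String)) (e : String × List String) :
    (let d1 := if d.contains e.1 then d else d.insert e.1 ([] : List String)
     d1.modify e.1 [] (· ++ e.2)) = d.modify e.1 [] (· ++ e.2) := by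
  by_cases h : d.contains e.1
  · simp [h]
  · simp only [h, Bool.false_eq_true, if_false]
    simp only [PySem.Dict.modify, PySem.Dict.getD_insert_self, PySem.Dict.insert_insert_self,
      PySem.Dict.getD_of_not_contains d ([] : List String) (by simpa using h)]

-- value of the modify-append loop at any key
theorem pv_getD_loop (L : List (String × List String)) (d : PySem.Dict String (List String)) (k : String) :
    (L.foldl (fun d e => d.modify e.1 [] (· ++ e.2)) d).getD k [] =
      d.getD k [] ++ (L.filter (fun e => e.1 == k)).flatMap (·.2) := by
  induction L generalizing d with
  | nil => simp
  | cons e L ih =>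
    simp only [List.foldl_cons, ih, List.filter_cons]
    by_cases hk : e.1 = k
    · simp [hk]
    · simp only [PySem.Dict.getD_modify, if_neg (fun h : k = e.1 => hk h.symm)]
      simp [hk]

theorem pv_flatMap_ite (L : List (String × List String)) (k : String) :
    L.flatMap (fun e => if e.1 == k then e.2 else []) =
      (L.filter (fun e => e.1 == k)).flatMap (·.2) := by
  induction L with
  | nil => rfl
  | cons e L ih =>
    simp only [List.flatMap_cons, List.filter_cons, ih]
    cases hbeq : (e.1 == k)
    · simp
    · simp [hbeq]

-- ===== VERDICT (by name: the statement is the Claim_ definition above) =====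
theorem devToAll_spec : Claim_equal_devToAll := by
  intro pd _
  unfold Spec_devToAll devToAll devToAll_alt
  -- collapse A's body to a plain modify loop over the flattened entry list
  have hbody : ∀ (d : PySem.Dict String (List String)) (e : String × List String),
      (let d1 := if d.contains e.1 then d else d.insert e.1 ([] : List String)
       d1.modify e.1 [] (· ++ e.2)) = d.modify e.1 [] (· ++ e.2) := pv_step_eq
  simp only [hbody]
  rw [← List.foldl_flatMap]
  set L : List (String × List String) := pd.flatMap (·.2) with hL
  set F : PySem.Dict String (List String) → (String × List String) → PySem.Dict String (List String) :=
    fun d e => d.modify e.1 [] (· ++ e.2) with hF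
  have hnd : (L.foldl F PySem.Dict.empty).keys.Nodup := by
    rw [hF]
    exact PySem.Dict.nodup_keys_foldl_modify_key L (·.1) [] (fun d x => (· ++ x.2)) _
      PySem.Dict.nodup_keys_empty
  have hkeys : (L.foldl F PySem.Dict.empty).keys = PySem.Set.ofList (L.map (·.1)) := by
    rw [hF]
    rw [PySem.Dict.keys_foldl_modify_key L (·.1) [] (fun d x => (· ++ x.2)) _]
    simp [PySem.Dict.keys_empty, PySem.Set.update_nil_left]
  rw [PySem.Dict.items_eq_map_keys _ hnd ([] : List String), hkeys]
  have hkeyeq : pd.flatMap (fun dev => dev.2.map (·.1)) = L.map (·.1) := by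
    rw [hL, List.map_flatMap]
  rw [PySem.List.dedup_eq_ofList, hkeyeq]
  apply List.map_congr_left
  intro k _
  rw [pv_getD_loop, PySem.Dict.getD_empty, List.nil_append]
  have hv : pd.flatMap (fun dev => dev.2.flatMap (fun e => if e.1 == k then e.2 else [])) =
      L.flatMap (fun e => if e.1 == k then e.2 else []) := by
    rw [hL, List.flatMap_assoc]
  rw [hv, pv_flatMap_ite]
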